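-- pv_equiv track=rewrite | github.com/shuu-tatsu/ds_ner | orig_data/chemdner/annotator/labeling_multi_label.py | bi_labeling
-- ===== SOURCE A (Python) =====
-- def bi_labeling(token_list, ne_tag_type):
--     labeled_ne_list = []
--     token_len = len(token_list)
--     if token_len == 1:
--        # S
--        string = token_list[0] + ' S-' + ne_tag_type.upper()
--        labeled_ne_list.append(string)
--     else:
--         for i, token in enumerate(token_list):
--             if i == 0:
--                 string = token + ' B-' + ne_tag_type.upper()
--             elif i+1 == token_len:
--                 string = token + ' E-' + ne_tag_type.upper()
--             else:
--                 string = token + ' I-' + ne_tag_type.upper()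
--             labeled_ne_list.append(string)
--     return labeled_ne_list
-- ===== SOURCE B (Python) =====
-- def bi_labeling(token_list, ne_tag_type):
--     tag = ne_tag_type.upper()
--     # Stage 1: uniform fill — label every token as inside ('I'), no branching.
--     out = [tok + ' I-' + tag for tok in token_list]
--     # Stage 2: patch the endpoints in place.
--     if out:
--         if len(out) == 1:
--             out[0] = token_list[0] + ' S-' + tag
--         else:
--             out[0] = token_list[0] + ' B-' + tag
--             out[-1] = token_list[-1] + ' E-' + tag
--     return out
-- ===== Notes on version B (the rewrite author's own statement) =====
-- stated objective: simpler
-- what changed: B replaces A's per-index if/elif/else loop by two stages: a branch-free uniform pass labelling every token 'I', then an in-place patch of the two endpoint entries (or the single 'S' entry).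
import Mathlib
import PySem

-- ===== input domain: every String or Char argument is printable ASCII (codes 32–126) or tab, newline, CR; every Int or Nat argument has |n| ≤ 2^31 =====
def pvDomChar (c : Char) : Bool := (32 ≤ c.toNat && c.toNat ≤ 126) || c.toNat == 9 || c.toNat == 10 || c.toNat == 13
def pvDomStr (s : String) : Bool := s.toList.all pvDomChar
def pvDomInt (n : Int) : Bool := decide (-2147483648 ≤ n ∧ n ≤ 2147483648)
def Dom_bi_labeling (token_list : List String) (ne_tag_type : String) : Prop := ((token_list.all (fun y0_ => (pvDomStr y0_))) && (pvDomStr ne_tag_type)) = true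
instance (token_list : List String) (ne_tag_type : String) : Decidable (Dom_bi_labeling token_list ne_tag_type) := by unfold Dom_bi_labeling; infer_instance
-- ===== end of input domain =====

-- B: two stages — a branch-free uniform 'I' labelling pass, then an in-place patch of the endpoint entries (simpler decomposition).
-- ===== PORT A =====
def bi_labeling (token_list : List String) (ne_tag_type : String) : List String :=
  let token_len : Int := token_list.length
  if token_len == 1 then
    match token_list with
    | t :: _ => [t ++ " S-" ++ PySem.Str.upper ne_tag_type]
    | [] => []
  else
    (PySem.List.enumerate token_list).foldl (fun acc p =>
      let s :=
        if p.1 == 0 then p.2 ++ " B-" ++ PySem.Str.upper ne_tag_type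
        else if p.1 + 1 == token_len then p.2 ++ " E-" ++ PySem.Str.upper ne_tag_type
        else p.2 ++ " I-" ++ PySem.Str.upper ne_tag_type
      acc ++ [s]) []

-- ===== PORT B =====
def bi_labeling_alt (token_list : List String) (ne_tag_type : String) : List String :=
  let tag := PySem.Str.upper ne_tag_type
  let out := token_list.map (fun tok => tok ++ " I-" ++ tag)
  if out.isEmpty then out
  else if out.length == 1 then
    out.set 0 (token_list.headI ++ " S-" ++ tag)
  else
    ((out.set 0 (token_list.headI ++ " B-" ++ tag)).set (out.length - 1)
      (token_list.getLastI ++ " E-" ++ tag))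

-- ===== PRECONDITION & SPEC =====
def Spec_bi_labeling (token_list : List String) (ne_tag_type : String) (out : List String) : Prop := out = bi_labeling_alt token_list ne_tag_type
instance (token_list : List String) (ne_tag_type : String) (out : List String) : Decidable (Spec_bi_labeling token_list ne_tag_type out) := by unfold Spec_bi_labeling; infer_instance

-- ===== CLAIM (what is proved, stated in full; the proofs are below) =====
def Claim_equal_bi_labeling : Prop := ∀ (token_list : List String) (ne_tag_type : String), Dom_bi_labeling token_list ne_tag_type → Spec_bi_labeling token_list ne_tag_type (bi_labeling token_list ne_tag_type)

-- ===== LEMMAS AND PROOFS =====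
lemma bi_labeling_eq (token_list : List String) (ne_tag_type : String) :
    bi_labeling token_list ne_tag_type = bi_labeling_alt token_list ne_tag_type := by
  match token_list with
  | [] => simp [bi_labeling, bi_labeling_alt, PySem.List.enumerate]
  | [t] => simp [bi_labeling, bi_labeling_alt]
  | t :: t2 :: rest =>
    have hne : (((t :: t2 :: rest).length : Int) == 1) = false := by
      simp; omega
    simp only [bi_labeling, bi_labeling_alt, hne, Bool.false_eq_true, if_false,
      PySem.List.foldl_append_singleton_eq_map, List.nil_append]
    have hE : (t :: t2 :: rest).isEmpty = false := by simp
    have h1 : ((t :: t2 :: rest).length == 1) = false := by simp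
    simp only [List.isEmpty_map, hE, List.length_map, h1, Bool.false_eq_true, if_false]
    apply List.ext_getElem
    · simp [PySem.List.length_enumerate]
    · intro i h1' h2'
      have hi : i < rest.length + 2 := by
        have := h1'; simp [PySem.List.length_enumerate] at this; omega
      rw [List.getElem_map, PySem.List.getElem_enumerate, List.getElem_set, List.getElem_set]
      by_cases h0 : i = 0
      · subst h0
        simp
      · by_cases hlast : i = rest.length + 1
        · subst hlast
          rw [if_neg (by simp <;> omega), if_pos (by simp <;> omega),
              if_pos (by simp <;> omega)]
          have hL : (t :: t2 :: rest).getLastI = (t :: t2 :: rest)[rest.length + 1]'(by simp) := by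
            rw [List.getLastI_eq_getLast?_getD, List.getLast?_eq_getElem?]
            simp
          rw [hL]
          rfl
        · rw [if_neg (by simp <;> omega), if_neg (by simp <;> omega),
              if_neg (by simp <;> omega), if_neg (by omega)]
          exact (List.getElem_map (f := fun tok => tok ++ " I-" ++ PySem.Str.upper ne_tag_type)
            (l := t :: t2 :: rest) (h := by simp; omega)).symm

-- ===== VERDICT (by name: the statement is the Claim_ definition above) =====
theorem bi_labeling_spec : Claim_equal_bi_labeling := by
  intro token_list ne_tag_type _
  unfold Spec_bi_labeling
  exact bi_labeling_eq token_list ne_tag_type
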